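-- pv_equiv track=rewrite | github.com/esuyer/MAPython_2025 | L16_VE_cw.py | even_to_dot
-- ===== SOURCE A (Python) =====
-- def even_to_dot(g):
--   new_st=""
--   for i in range (len(g)):
--       if i % 2==0:
--         new_st+="."
--       else:
--         new_st+=g[i]
--
--   return new_st
-- ===== SOURCE B (Python) =====
-- def even_to_dot(g):
--     # Bulk slice assignment instead of a per-index loop with a branch.
--     l = list(g)
--     k = (len(l) + 1) // 2          # number of even positions
--     l[::2] = '.' * k
--     return ''.join(l)
-- ===== Notes on version B (the rewrite author's own statement) =====
-- stated objective: idiomatic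
-- what changed: Replaces the per-index loop with its even/odd branch by one bulk slice assignment of a run of dots into the even positions of a char list, then a single join.
import Mathlib
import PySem

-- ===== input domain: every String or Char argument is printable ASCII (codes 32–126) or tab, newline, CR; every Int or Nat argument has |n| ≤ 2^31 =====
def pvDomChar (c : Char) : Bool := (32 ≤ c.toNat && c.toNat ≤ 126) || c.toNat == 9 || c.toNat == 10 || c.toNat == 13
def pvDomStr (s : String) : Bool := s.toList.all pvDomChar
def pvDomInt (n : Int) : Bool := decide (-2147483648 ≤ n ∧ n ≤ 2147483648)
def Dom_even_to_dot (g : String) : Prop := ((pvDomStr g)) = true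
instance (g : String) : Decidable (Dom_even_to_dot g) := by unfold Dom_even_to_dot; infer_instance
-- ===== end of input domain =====

-- B replaces A's per-index loop and even/odd branch by one bulk slice assignment
-- l[::2] = '.' * ceil(n/2) followed by a join (idiomatic; return value proved equal).


-- ===== PORT A =====
-- new_st accumulated as a list of chars (Python str built by '+='); g[i] is always
-- in range here, so pyGetD with an unused default is exact.
def even_to_dot (g : String) : String :=
  String.ofList ((PySem.List.pyRange 0 (PySem.Str.len g) 1).foldl
    (fun acc i =>
      if PySem.Int.mod i 2 = 0 then acc ++ ['.']
      else acc ++ [PySem.List.pyGetD g.toList i ' '])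
    [])

-- ===== PORT B =====
-- hand port of the slice assignment 'l[::2] = repl' (replacement length always equals
-- the number of even positions here, so no ValueError case arises): write the chars of
-- repl at positions 0,2,4,… of l.
def setStep2 : List Char → List Char → List Char
  | [], l => l
  | _ :: _, [] => []
  | r :: _, [_] => [r]
  | r :: rs, _ :: b :: t => r :: b :: setStep2 rs t

def even_to_dot_alt (g : String) : String :=
  let l := g.toList
  let k : Int := PySem.Int.floordiv ((l.length : Int) + 1) 2
  String.ofList (setStep2 (List.replicate k.toNat '.') l)

-- ===== PRECONDITION & SPEC =====
def Spec_even_to_dot (g : String) (out : String) : Prop := out = even_to_dot_alt g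
instance (g : String) (out : String) : Decidable (Spec_even_to_dot g out) := by unfold Spec_even_to_dot; infer_instance

-- ===== CLAIM (what is proved, stated in full; the proofs are below) =====
def Claim_equal_even_to_dot : Prop := ∀ (g : String), Dom_even_to_dot g → Spec_even_to_dot g (even_to_dot g)

-- ===== LEMMAS AND PROOFS =====

-- canonical result: dot at even positions, original char at odd ones
def dotify : List Char → List Char
  | [] => []
  | [_] => ['.']
  | _ :: b :: t => '.' :: b :: dotify t

theorem mapDot (l : List Char) :
    (List.range l.length).map
      (fun k => if k % 2 = 0 then ('.' : Char) else l.getD k ' ') = dotify l := by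
  induction l using dotify.induct with
  | case1 => simp [dotify]
  | case2 a => simp [dotify, List.range_succ]
  | case3 a b t ih =>
      have h2 : (a :: b :: t).length = t.length + 1 + 1 := by simp
      rw [h2, List.range_succ_eq_map, List.range_succ_eq_map, dotify]
      simp only [List.map_cons, List.map_map]
      refine congrArg₂ List.cons (by norm_num) (congrArg₂ List.cons (by norm_num) ?_)
      rw [← ih]
      apply List.map_congr_left
      intro k hk
      simp only [Function.comp_apply, Nat.succ_eq_add_one]
      have hp : (k + 1 + 1) % 2 = k % 2 := by omega
      rw [hp]
      by_cases h : k % 2 = 0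
      · simp [h]
      · simp [h, List.getD]

theorem foldA (l : List Char) :
    (PySem.List.pyRange 0 (l.length : Int) 1).foldl
      (fun acc i =>
        if PySem.Int.mod i 2 = 0 then acc ++ ['.']
        else acc ++ [PySem.List.pyGetD l i ' ']) [] = dotify l := by
  have hbody : ∀ (acc : List Char) (i : Int),
      (if PySem.Int.mod i 2 = 0 then acc ++ ['.'] else acc ++ [PySem.List.pyGetD l i ' '])
        = acc ++ [if PySem.Int.mod i 2 = 0 then '.' else PySem.List.pyGetD l i ' '] := by
    intro acc i
    by_cases h : PySem.Int.mod i 2 = 0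
    · rw [if_pos h, if_pos h]
    · rw [if_neg h, if_neg h]
  simp only [hbody]
  rw [PySem.List.foldl_append_singleton_eq_map]
  rw [PySem.List.pyRange_one]
  simp only [List.nil_append, List.map_map, Int.sub_zero, Int.toNat_natCast]
  rw [← mapDot]
  apply List.map_congr_left
  intro k hk
  simp only [Function.comp_apply, Int.zero_add]
  have hmod : PySem.Int.mod (k : Int) 2 = ((k % 2 : Nat) : Int) := by
    simp only [PySem.Int.mod, Int.fmod_eq_emod]
    omega
  rw [hmod, PySem.List.pyGetD_natCast]
  by_cases h : k % 2 = 0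
  · have h0 : ((k % 2 : Nat) : Int) = 0 := by omega
    rw [if_pos h0, if_pos h]
  · have h0 : ¬ ((k % 2 : Nat) : Int) = 0 := by omega
    rw [if_neg h0, if_neg h]

theorem setRep (l : List Char) :
    setStep2 (List.replicate ((l.length + 1) / 2) '.') l = dotify l := by
  induction l using dotify.induct with
  | case1 => simp [setStep2, dotify]
  | case2 a => simp [setStep2, dotify]
  | case3 a b t ih =>
      have h : ((a :: b :: t).length + 1) / 2 = (t.length + 1) / 2 + 1 := by simp; omega
      rw [h, List.replicate_succ, setStep2, ih, dotify]

-- ===== VERDICT (by name: the statement is the Claim_ definition above) =====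
theorem even_to_dot_spec : Claim_equal_even_to_dot := by
  intro g _
  show even_to_dot g = even_to_dot_alt g
  unfold even_to_dot even_to_dot_alt
  have hlen : PySem.Str.len g = (g.toList.length : Int) := by
    simp [PySem.Str.len]
  have hk : (PySem.Int.floordiv ((g.toList.length : Int) + 1) 2).toNat
      = (g.toList.length + 1) / 2 := by
    simp only [PySem.Int.floordiv]
    rw [Int.fdiv_eq_ediv]
    simp
    omega
  rw [hlen, foldA g.toList]
  simp only [hk, setRep]
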